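-- pv_equiv track=rewrite | github.com/0xQQa/Write-ups | CTFs/python-rev-for-freaks/pytohn_freak_reversed.py | prepare_input_reversed
-- ===== SOURCE A (Python) =====
-- def prepare_input_reversed(k_reversed):
--     out_str_chunk = ""
--
--     for _ in range(8):
--         curr_leter = k_reversed & 0x7F
--         if curr_leter == 0x7F:
--             break
--
--         k_reversed >>= 7
--         out_str_chunk += chr(curr_leter)
--
--     return out_str_chunk
-- ===== SOURCE B (Python) =====
-- def prepare_input_reversed(k_reversed):
--     # Recursive base-128 digit decomposition: peel one digit with divmod,
--     # recurse on the quotient, prepend the decoded character.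
--     def go(k, budget):
--         if budget == 0:
--             return ''
--         c = k % 128
--         if c == 0x7F:
--             return ''
--         return chr(c) + go(k // 128, budget - 1)
--     return go(k_reversed, 8)
-- ===== Notes on version B (the rewrite author's own statement) =====
-- stated objective: alternative
-- what changed: Replaces A's iterative mutate-and-break accumulator loop over bitwise mask/shift with a recursive base-128 divmod digit decomposition that prepends each decoded character to the recursive result.
import Mathlib
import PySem

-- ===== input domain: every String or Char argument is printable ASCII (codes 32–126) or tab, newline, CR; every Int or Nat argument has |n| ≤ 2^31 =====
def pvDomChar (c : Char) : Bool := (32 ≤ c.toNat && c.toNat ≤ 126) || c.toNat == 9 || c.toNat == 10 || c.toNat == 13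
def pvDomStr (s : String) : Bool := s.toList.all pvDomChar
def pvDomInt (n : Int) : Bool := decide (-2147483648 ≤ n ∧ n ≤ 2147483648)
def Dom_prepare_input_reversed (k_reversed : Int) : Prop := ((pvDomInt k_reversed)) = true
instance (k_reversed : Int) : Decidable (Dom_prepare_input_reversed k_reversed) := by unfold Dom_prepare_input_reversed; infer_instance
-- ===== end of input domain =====

-- B replaces A's iterative mask/shift accumulator loop by a recursive base-128
-- divmod digit decomposition prepending each character (alternative; same cost).

-- ===== PORT A =====
-- the for-loop with break: fuel = remaining iterations, state = (k_reversed, out_str_chunk)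
def pvALoop : Nat → Int → List Char → List Char
  | 0, _, acc => acc
  | n + 1, k, acc =>
    let curr := PySem.Int.band k 0x7F
    if curr = 0x7F then acc
    else pvALoop n (k >>> (7 : Nat)) (acc ++ [Char.ofNat curr.toNat])

def prepare_input_reversed (k_reversed : Int) : String :=
  String.ofList (pvALoop 8 k_reversed [])

-- ===== PORT B =====
-- recursive helper 'go': peel one base-128 digit, recurse on the quotient, prepend
def pvBGo : Int → Nat → List Char
  | _, 0 => []
  | k, budget + 1 =>
    let c := PySem.Int.mod k 128
    if c = 0x7F then []
    else Char.ofNat c.toNat :: pvBGo (PySem.Int.floordiv k 128) budget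

def prepare_input_reversed_alt (k_reversed : Int) : String :=
  String.ofList (pvBGo k_reversed 8)

-- ===== PRECONDITION & SPEC =====
def Spec_prepare_input_reversed (k_reversed : Int) (out : String) : Prop := out = prepare_input_reversed_alt k_reversed
instance (k_reversed : Int) (out : String) : Decidable (Spec_prepare_input_reversed k_reversed out) := by unfold Spec_prepare_input_reversed; infer_instance

-- ===== CLAIM (what is proved, stated in full; the proofs are below) =====
def Claim_equal_prepare_input_reversed : Prop := ∀ (k_reversed : Int), Dom_prepare_input_reversed k_reversed → Spec_prepare_input_reversed k_reversed (prepare_input_reversed k_reversed)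

-- ===== LEMMAS AND PROOFS =====

-- bridge: Python's k & 0x7F is k % 128
theorem pv_band127_eq_mod (k : Int) : PySem.Int.band k 127 = PySem.Int.mod k 128 := by
  have hm : PySem.Int.mod k 128 = k % 128 := PySem.Int.mod_eq_emod_of_pos (by norm_num)
  cases k with
  | ofNat n =>
    have hn : n &&& 127 = n % 128 := by
      simpa using Nat.and_two_pow_sub_one_eq_mod n 7
    rw [hm]
    simp [PySem.Int.band, hn]
  | negSucc n =>
    have hn : 127 &&& n = n % 128 := by
      rw [Nat.and_comm]
      simpa using Nat.and_two_pow_sub_one_eq_mod n 7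
    rw [hm]
    simp [PySem.Int.band, hn]
    omega

-- bridge: Python's k >> 7 is k // 128
theorem pv_shr7_eq_floordiv (k : Int) : k >>> (7 : Nat) = PySem.Int.floordiv k 128 := by
  have hd : PySem.Int.floordiv k 128 = k / 128 := PySem.Int.floordiv_eq_ediv_of_pos (by norm_num)
  cases k with
  | ofNat n =>
    show Int.ofNat (n >>> 7) = _
    rw [hd, Nat.shiftRight_eq_div_pow]
    norm_num
  | negSucc n =>
    show Int.negSucc (n >>> 7) = _
    rw [hd, Nat.shiftRight_eq_div_pow]
    norm_num
    omega

theorem pvALoop_eq_pvBGo (n : Nat) (k : Int) (acc : List Char) :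
    pvALoop n k acc = acc ++ pvBGo k n := by
  induction n generalizing k acc with
  | zero => simp [pvALoop, pvBGo]
  | succ n ih =>
    have hm : PySem.Int.mod k 128 = k % 128 := PySem.Int.mod_eq_emod_of_pos (by norm_num)
    have hd : PySem.Int.floordiv k 128 = k / 128 := PySem.Int.floordiv_eq_ediv_of_pos (by norm_num)
    simp only [pvALoop, pvBGo, pv_band127_eq_mod, pv_shr7_eq_floordiv, hm, hd]
    by_cases hc : k % 128 = 127
    · simp [hc]
    · simp only [if_neg hc, ih]
      simp

-- ===== VERDICT (by name: the statement is the Claim_ definition above) =====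
theorem prepare_input_reversed_spec : Claim_equal_prepare_input_reversed := by
  intro k _
  unfold Spec_prepare_input_reversed prepare_input_reversed prepare_input_reversed_alt
  rw [pvALoop_eq_pvBGo]
  simp
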